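-- pv_equiv track=rewrite | github.com/Rajasvi/ece-143-programming-assignments | sample_bitstrings_4.py | gather_values
-- ===== SOURCE A (Python) =====
-- def map_bitstring(l):
--     ''' This func takes a list of bitstrings (i.e., 0101) and maps each bitstring
--     to 0 if the number of 0s in the bitstring strictly exceeds the number of 1s
--     '''
--     assert isinstance(l,list)
--     strings = list(set(l))
--     ans = {}
--     for s in strings:
--         assert isinstance(s,str)
--         intString = []
--         for b in s:
--             assert b=='1' or b=='0'
--             intString.append(int(b))
--
--         if sum(intString)>=len(intString)-sum(intString):
--             ans[s]=1
--         else: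
--             ans[s]=0
--     return ans
--
-- def gather_values(x):
--     '''This func generates n samples and tally the number of times an
--     existing key is repeated. Generate a new dictionary with
--     bitstrings as keys and with values as lists that contain
--     the corresponding mapped values from map_bitstring.
--     '''
--     assert isinstance(x,list)
--     bit_map = map_bitstring(x)
--     freq_map = {}
--     for b in x:
--         if b not in freq_map:
--             freq_map[b]=[]
--         freq_map[b].append(bit_map[b])
--     return freq_map
-- ===== SOURCE B (Python) =====
-- def map_bitstring(l):
--     assert isinstance(l,list)
--     strings = list(set(l))
--     ans = {}
--     for s in strings:
--         assert isinstance(s,str)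
--         intString = []
--         for b in s:
--             assert b=='1' or b=='0'
--             intString.append(int(b))
--         if sum(intString)>=len(intString)-sum(intString):
--             ans[s]=1
--         else:
--             ans[s]=0
--     return ans
--
-- def gather_values(x):
--     assert isinstance(x,list)
--     bit_map = map_bitstring(x)
--     counts = {}
--     for b in x:
--         counts[b] = counts.get(b, 0) + 1
--     return {b: [bit_map[b]] * c for b, c in counts.items()}
-- ===== Notes on version B (the rewrite author's own statement) =====
-- stated objective: alternative
-- what changed: Instead of appending bit_map[b] per occurrence into a growing dict of lists, B counts occurrences in one pass and then builds each result list at once as [bit_map[b]] * count over the unique keys.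
import Mathlib
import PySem

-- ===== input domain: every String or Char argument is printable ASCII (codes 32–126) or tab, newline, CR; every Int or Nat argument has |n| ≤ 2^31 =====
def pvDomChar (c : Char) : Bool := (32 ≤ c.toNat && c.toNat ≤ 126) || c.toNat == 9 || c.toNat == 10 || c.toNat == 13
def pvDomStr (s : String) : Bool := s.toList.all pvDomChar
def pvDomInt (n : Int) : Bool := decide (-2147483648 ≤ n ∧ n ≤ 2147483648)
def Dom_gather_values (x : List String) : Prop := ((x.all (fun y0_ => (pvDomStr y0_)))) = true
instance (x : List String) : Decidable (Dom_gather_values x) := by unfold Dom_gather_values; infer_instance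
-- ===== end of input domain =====

-- B replaces A's per-occurrence list appending by a count pass plus a per-unique-key
-- [bit_map[b]] * count construction (alternative decomposition, same cost).

-- ===== PORT A =====
-- helper shared by both programs (both Pythons contain the identical map_bitstring)
def map_bitstring (l : List String) : PySem.Dict String Int :=
  (PySem.Set.ofList l).foldl (fun ans s =>
    -- int(b): under Pre_ every char is '0' or '1' (the assert raises otherwise), so this is exact
    let intString : List Int := s.toList.map (fun b => if b = '1' then (1 : Int) else 0)
    let tot := intString.foldl (· + ·) 0
    if tot ≥ (intString.length : Int) - tot then ans.insert s 1 else ans.insert s 0)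
    PySem.Dict.empty

def gather_values (x : List String) : List (String × List Int) :=
  let bit_map := map_bitstring x
  (x.foldl (fun fm b =>
      let fm := if fm.contains b then fm else fm.insert b ([] : List Int)
      fm.modify b [] (fun l => l ++ [bit_map.getD b 0]))
    PySem.Dict.empty).items

-- ===== PORT B =====
def gather_values_alt (x : List String) : List (String × List Int) :=
  let bit_map := map_bitstring x
  let counts := x.foldl (fun c b => c.insert b (c.getD b 0 + 1)) (PySem.Dict.empty : PySem.Dict String Int)
  counts.items.map (fun p => (p.1, List.replicate p.2.toNat (bit_map.getD p.1 0)))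

-- ===== PRECONDITION & SPEC =====
-- Pre_ excludes exactly the inputs on which the Python A raises AssertionError:
-- a string containing a character other than '0' or '1'.
def Pre_gather_values (x : List String) : Prop :=
  (x.all (fun s => s.toList.all (fun c => c == '0' || c == '1'))) = true
instance (x : List String) : Decidable (Pre_gather_values x) := by unfold Pre_gather_values; infer_instance
def pvWitness_gather_values : List String := ["01", "01", "1", "001"]
def Spec_gather_values (x : List String) (out : List (String × List Int)) : Prop := out = gather_values_alt x
instance (x : List String) (out : List (String × List Int)) : Decidable (Spec_gather_values x out) := by unfold Spec_gather_values; infer_instance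

-- ===== CLAIM (what is proved, stated in full; the proofs are below) =====
def Claim_equal_gather_values : Prop := ∀ (x : List String), Dom_gather_values x → Pre_gather_values x → Spec_gather_values x (gather_values x)

-- ===== LEMMAS AND PROOFS =====

-- one step of A's loop, seen through getD
theorem pv_stepA_getD (d : PySem.Dict String (List Int)) (b c : String) (v : String → Int) :
    ((if d.contains b then d else d.insert b ([] : List Int)).modify b []
        (fun l => l ++ [v b])).getD c []
      = if c = b then d.getD c [] ++ [v b] else d.getD c [] := by
  by_cases hb : d.contains b = true
  · simp [hb, PySem.Dict.getD_modify]
    by_cases hc : c = b <;> simp [hc]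
  · simp [hb, PySem.Dict.getD_modify, PySem.Dict.getD_insert]
    by_cases hc : c = b
    · subst hc
      simp [PySem.Dict.getD_of_not_contains _ _ (by simpa using hb)]
    · simp [hc]

-- A's whole loop, seen through getD: each key c collects one copy of v c per occurrence
theorem pv_foldA_getD (x : List String) (v : String → Int) (c : String) :
    ∀ d : PySem.Dict String (List Int),
      (x.foldl (fun fm b =>
          (if fm.contains b then fm else fm.insert b ([] : List Int)).modify b []
            (fun l => l ++ [v b])) d).getD c []
        = d.getD c [] ++ List.replicate (x.count c) (v c) := by
  induction x with
  | nil => intro d; simp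
  | cons b x ih =>
    intro d
    rw [List.foldl_cons, ih, pv_stepA_getD]
    by_cases hc : c = b
    · subst hc
      simp [List.replicate_succ, List.append_assoc]
    · simp [hc, Ne.symm hc]

-- A's whole loop, seen through keys: first occurrences of x in order
theorem pv_foldA_keys (x : List String) (v : String → Int) :
    (x.foldl (fun fm b =>
        (if fm.contains b then fm else fm.insert b ([] : List Int)).modify b []
          (fun l => l ++ [v b])) PySem.Dict.empty).keys
      = PySem.Set.ofList x := by
  suffices h : ∀ d : PySem.Dict String (List Int),
      (x.foldl (fun fm b =>
          (if fm.contains b then fm else fm.insert b ([] : List Int)).modify b []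
            (fun l => l ++ [v b])) d).keys = PySem.Set.update d.keys x by
    simpa [PySem.Set.update_nil_left] using h PySem.Dict.empty
  induction x with
  | nil => intro d; simp [PySem.Set.update]
  | cons b x ih =>
    intro d
    rw [List.foldl_cons, ih, PySem.Set.update_cons]
    congr 1
    by_cases hb : d.contains b = true
    · have hmem : b ∈ d.keys := (PySem.Dict.contains_iff_mem_keys d b).mp hb
      simp only [hb, if_true, PySem.Dict.keys_modify,
        PySem.Dict.keys_insert_of_contains _ _ hb, PySem.Set.add_of_mem hmem]
    · have hb' : d.contains b = false := by simpa using hb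
      have hnm : b ∉ d.keys := by simpa [PySem.Dict.contains_iff_mem_keys] using hb
      simp [hb', PySem.Dict.keys_modify, PySem.Dict.insert_insert_self,
        PySem.Dict.keys_insert_of_not_contains _ _ hb', hnm]

-- the two decompositions build the same association list, for any value function v
theorem pv_main (x : List String) (v : String → Int) :
    (x.foldl (fun fm b =>
        (if fm.contains b then fm else fm.insert b ([] : List Int)).modify b []
          (fun l => l ++ [v b])) PySem.Dict.empty).items
      = (PySem.Dict.counter x).items.map
          (fun p => (p.1, List.replicate p.2.toNat (v p.1))) := by
  have hkeys := pv_foldA_keys x v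
  have hnodup : (x.foldl (fun fm b =>
      (if fm.contains b then fm else fm.insert b ([] : List Int)).modify b []
        (fun l => l ++ [v b])) PySem.Dict.empty).keys.Nodup := by
    rw [hkeys]; exact PySem.Set.nodup_ofList x
  rw [PySem.Dict.items_eq_map_keys _ hnodup ([] : List Int), hkeys,
    PySem.Dict.items_counter, List.map_map]
  refine List.map_congr_left ?_
  intro k _
  simp only [Function.comp]
  rw [pv_foldA_getD x v k PySem.Dict.empty]
  simp

-- ===== VERDICT (by name: the statement is the Claim_ definition above) =====
theorem gather_values_spec : Claim_equal_gather_values := by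
  intro x _hdom _hpre
  exact pv_main x (fun b => (map_bitstring x).getD b 0)
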